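-- pv_equiv track=rewrite | github.com/qianghan/Kevin | profiler/app/backend/services/document/validation.py | _validate_filename
-- ===== SOURCE A (Python) =====
-- def _validate_filename(filename: str) -> bool:
--     """
--     Validate a filename.
--
--     Args:
--         filename: Name of the file
--
--     Returns:
--         True if valid, False otherwise
--     """
--     # Filename must be 1-255 characters
--     if not filename or len(filename) > 255:
--         return False
--
--     # Filename must not contain invalid characters
--     invalid_chars = ['/', '\\', ':', '*', '?', '"', '<', '>', '|']
--     for char in invalid_chars:
--         if char in filename:
--             return False
--
--     return True
-- ===== SOURCE B (Python) =====
-- _INVALID = {'/', '\\', ':', '*', '?', '"', '<', '>', '|'}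
--
-- def _validate_filename(filename: str) -> bool:
--     if not filename or len(filename) > 255:
--         return False
--     return all(c not in _INVALID for c in filename)
-- ===== Notes on version B (the rewrite author's own statement) =====
-- stated objective: idiomatic
-- what changed: Instead of scanning the filename once per forbidden character (9 substring scans with early return), B walks the filename once, testing each character against a precomputed set of the 9 forbidden characters.
import Mathlib
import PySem

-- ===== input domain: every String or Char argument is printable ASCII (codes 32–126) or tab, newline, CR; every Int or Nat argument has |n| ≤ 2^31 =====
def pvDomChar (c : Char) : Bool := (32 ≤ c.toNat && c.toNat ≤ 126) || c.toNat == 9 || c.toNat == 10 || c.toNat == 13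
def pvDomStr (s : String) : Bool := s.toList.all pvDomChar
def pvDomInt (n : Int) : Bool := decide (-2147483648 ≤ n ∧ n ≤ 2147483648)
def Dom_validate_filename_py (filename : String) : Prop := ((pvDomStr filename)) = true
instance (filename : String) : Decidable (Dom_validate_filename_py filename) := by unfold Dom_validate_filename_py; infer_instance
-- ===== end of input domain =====

-- B replaces A's nine substring scans by a single pass over the filename with a set-membership test (idiomatic; same cost).
-- ===== PORT A =====
-- A: length/empty guard, then a loop over the 9 invalid characters, each doing a substring scan
def validateLoopA (filename : String) : List Char → Bool
  | [] => true
  | c :: rest => if (PySem.Str.isIn (String.ofList [c]) filename) then false else validateLoopA filename rest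

def validate_filename_py (filename : String) : Bool :=
  if filename.toList.length == 0 || filename.toList.length > 255 then false
  else validateLoopA filename ['/', '\\', ':', '*', '?', '"', '<', '>', '|']

-- ===== PORT B =====
-- B: same guard, then ONE pass over the filename testing membership in the forbidden set
def invalidSetB : PySem.Set Char := PySem.Set.ofList ['/', '\\', ':', '*', '?', '"', '<', '>', '|']

def validate_filename_py_alt (filename : String) : Bool :=
  if filename.toList.length == 0 || filename.toList.length > 255 then false
  else filename.toList.all (fun c => !(PySem.Set.contains invalidSetB c))

-- ===== PRECONDITION & SPEC =====
def Spec_validate_filename_py (filename : String) (out : Bool) : Prop := out = validate_filename_py_alt filename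
instance (filename : String) (out : Bool) : Decidable (Spec_validate_filename_py filename out) := by unfold Spec_validate_filename_py; infer_instance

-- ===== CLAIM (what is proved, stated in full; the proofs are below) =====
def Claim_equal_validate_filename_py : Prop := ∀ (filename : String), Dom_validate_filename_py filename → Spec_validate_filename_py filename (validate_filename_py filename)

-- ===== LEMMAS AND PROOFS =====

-- ===== VERDICT (by name: the statement is the Claim_ definition above) =====
theorem singleton_infix_iff_mem {α : Type} (c : α) (l : List α) : [c] <:+: l ↔ c ∈ l := by
  constructor
  · rintro ⟨s, t, rfl⟩; simp
  · intro h
    obtain ⟨s, t, rfl⟩ := List.append_of_mem h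
    exact ⟨s, t, by simp⟩

theorem loopA_eq (f : String) (inv : List Char) :
    validateLoopA f inv = inv.all (fun c => !(f.toList.contains c)) := by
  induction inv with
  | nil => rfl
  | cons c rest ih =>
    simp only [validateLoopA, List.all_cons]
    by_cases h : c ∈ f.toList
    · rw [if_pos, Bool.eq_iff_iff]
      · simp [h]
      · simp [PySem.Str.isIn, PySem.Chars.isIn_iff_infix, String.toList_ofList, singleton_infix_iff_mem, h]
    · rw [if_neg, ih, Bool.eq_iff_iff]
      · simp [h]
      · simp [PySem.Str.isIn, PySem.Chars.isIn_eq_false_iff, String.toList_ofList, singleton_infix_iff_mem, h]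

theorem all_swap (l inv : List Char) :
    inv.all (fun c => !(l.contains c)) = l.all (fun c => !(inv.contains c)) := by
  rw [Bool.eq_iff_iff]
  simp only [List.all_eq_true, Bool.not_eq_true', List.contains_eq_mem, decide_eq_false_iff_not]
  exact ⟨fun h c hc hm => h _ hm hc, fun h c hc hm => h _ hm hc⟩

theorem validate_filename_py_spec : Claim_equal_validate_filename_py := by
  intro filename _
  unfold Spec_validate_filename_py validate_filename_py validate_filename_py_alt
  split
  · rfl
  · rw [loopA_eq, all_swap]
    rfl
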